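-- pv_equiv track=rewrite | github.com/ratschlab/projects2019-string-embedding | code/python/pytools.py | table_summary
-- ===== SOURCE A (Python) =====
-- def table_summary(table):
--     names = set()
--     full_names = set()
--     for t in table:
--         for r in t[0]:
--             full_names.add(r[0])
--             names.add(r[0].split('.')[0])
--     return names,full_names
-- ===== SOURCE B (Python) =====
-- def table_summary(table):
--     if not table:
--         return set(), set()
--     if len(table) == 1:
--         full_names = {r[0] for r in table[0][0]}
--         names = {f.split('.')[0] for f in full_names}
--         return names, full_names
--     mid = len(table) // 2
--     ln, lf = table_summary(table[:mid])
--     rn, rf = table_summary(table[mid:])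
--     return ln | rn, lf | rf
-- ===== Notes on version B (the rewrite author's own statement) =====
-- stated objective: alternative
-- what changed: B is a divide-and-conquer recursion: it splits the table in half, recurses on each half, and merges the (names, full_names) results with set unions, computing names from the per-leaf deduplicated full-name set; A is one nested imperative loop adding to both sets per row.
import Mathlib
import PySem

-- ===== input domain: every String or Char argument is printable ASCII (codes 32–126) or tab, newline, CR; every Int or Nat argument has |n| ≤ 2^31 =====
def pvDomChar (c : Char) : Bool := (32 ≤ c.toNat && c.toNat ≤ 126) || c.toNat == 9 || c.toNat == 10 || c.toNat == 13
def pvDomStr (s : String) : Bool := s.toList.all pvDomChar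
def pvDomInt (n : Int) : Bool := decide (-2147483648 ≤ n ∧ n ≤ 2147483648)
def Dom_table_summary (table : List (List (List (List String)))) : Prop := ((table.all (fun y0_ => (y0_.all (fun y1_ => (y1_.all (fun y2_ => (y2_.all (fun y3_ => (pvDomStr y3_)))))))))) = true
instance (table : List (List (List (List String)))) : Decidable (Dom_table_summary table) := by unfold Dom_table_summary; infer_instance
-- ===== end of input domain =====

-- B is a divide-and-conquer recursion (split the table in half, recurse, merge with set
-- unions) instead of A's single nested imperative loop (objective: alternative).

-- shared helper: r0.split('.')[0] (split? with sep "." is always some, ported via .getD [])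
def pvPrefix (f : String) : String :=
  PySem.List.pyGetD ((PySem.Str.split? f ".").getD []) 0 ""

-- ===== PORT A =====
-- pyGetD with default is exact under Pre_ (indices in range there; Pre_ excludes the IndexError inputs)
def table_summary (table : List (List (List (List String)))) : List String × List String :=
  table.foldl
    (fun st t =>
      (PySem.List.pyGetD t 0 []).foldl
        (fun st r =>
          (PySem.Set.add st.1 (pvPrefix (PySem.List.pyGetD r 0 "")),
           PySem.Set.add st.2 (PySem.List.pyGetD r 0 "")))
        st)
    (PySem.Set.empty, PySem.Set.empty)

-- ===== PORT B =====
def table_summary_alt (table : List (List (List (List String)))) : List String × List String :=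
  if table = [] then (PySem.Set.empty, PySem.Set.empty)
  else if table.length = 1 then
    let full_names : PySem.Set String :=
      PySem.Set.ofList
        ((PySem.List.pyGetD (PySem.List.pyGetD table 0 []) 0 []).map
          (fun r => PySem.List.pyGetD r 0 ""))
    let names : PySem.Set String := PySem.Set.ofList (full_names.map pvPrefix)
    (names, full_names)
  else
    let mid := PySem.Int.floordiv (table.length : Int) 2
    let left := table_summary_alt (PySem.List.slice table none (some mid))
    let right := table_summary_alt (PySem.List.slice table (some mid) none)
    (PySem.Set.union left.1 right.1, PySem.Set.union left.2 right.2)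
termination_by table.length
decreasing_by
  · rw [show PySem.Int.floordiv ((table.length : Int)) 2 = ((table.length / 2 : Nat) : Int) from
        by exact_mod_cast PySem.Int.floordiv_natCast table.length 2,
      PySem.List.slice_to_natCast, List.length_take]
    have h0 : table.length ≠ 0 := by simpa [List.length_eq_zero_iff] using ‹¬table = []›
    omega
  · rw [show PySem.Int.floordiv ((table.length : Int)) 2 = ((table.length / 2 : Nat) : Int) from
        by exact_mod_cast PySem.Int.floordiv_natCast table.length 2,
      PySem.List.slice_from_natCast, List.length_drop]
    have h0 : table.length ≠ 0 := by simpa [List.length_eq_zero_iff] using ‹¬table = []›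
    omega

-- ===== PRECONDITION & SPEC =====
-- Pre_ excludes exactly the inputs where Python A raises IndexError: an empty t (t[0]) or an empty row r (r[0]).
def Pre_table_summary (table : List (List (List (List String)))) : Prop :=
  ∀ t ∈ table, t ≠ [] ∧ ∀ r ∈ PySem.List.pyGetD t 0 ([] : List (List String)), r ≠ ([] : List String)
instance (table : List (List (List (List String)))) : Decidable (Pre_table_summary table) := by
  unfold Pre_table_summary; infer_instance
def pvWitness_table_summary : List (List (List (List String))) := [[[["a.b"], ["c"]]]]
def Spec_table_summary (table : List (List (List (List String)))) (out : List String × List String) : Prop := out = table_summary_alt table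
instance (table : List (List (List (List String)))) (out : List String × List String) : Decidable (Spec_table_summary table out) := by unfold Spec_table_summary; infer_instance

-- ===== CLAIM (what is proved, stated in full; the proofs are below) =====
def Claim_equal_table_summary : Prop := ∀ (table : List (List (List (List String)))), Dom_table_summary table → Pre_table_summary table → Spec_table_summary table (table_summary table)

-- ===== LEMMAS AND PROOFS =====

-- the list of full names contributed by one table entry, and by the whole table
def pvRowvals (t : List (List (List String))) : List String :=
  (PySem.List.pyGetD t 0 []).map (fun r => PySem.List.pyGetD r 0 "")
def pvFulls (table : List (List (List (List String)))) : List String :=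
  table.flatMap pvRowvals

-- adding f to full_names and pvPrefix f to names preserves A's pair invariant
lemma pv_add_inv (n fn : List String) (f : String)
    (h : n = PySem.Set.ofList (fn.map pvPrefix)) :
    PySem.Set.add n (pvPrefix f) = PySem.Set.ofList ((PySem.Set.add fn f).map pvPrefix) := by
  by_cases hf : f ∈ fn
  · have hg : pvPrefix f ∈ n := by
      rw [h, PySem.Set.mem_ofList]; exact List.mem_map_of_mem hf
    rw [PySem.Set.add_of_mem hf, PySem.Set.add_of_mem hg, h]
  · rw [PySem.Set.add_of_not_mem hf, List.map_append, List.map_singleton,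
      PySem.Set.ofList_append_singleton, ← h]

-- A's inner per-row fold on the pair tracks the fold on full_names alone
lemma pv_inner (rows : List (List String)) (st : PySem.Set String × PySem.Set String)
    (h : st.1 = PySem.Set.ofList (st.2.map pvPrefix)) :
    rows.foldl
      (fun st r =>
        (PySem.Set.add st.1 (pvPrefix (PySem.List.pyGetD r 0 "")),
         PySem.Set.add st.2 (PySem.List.pyGetD r 0 ""))) st
    = (PySem.Set.ofList
        ((rows.foldl (fun s r => PySem.Set.add s (PySem.List.pyGetD r 0 "")) st.2).map pvPrefix),
       rows.foldl (fun s r => PySem.Set.add s (PySem.List.pyGetD r 0 "")) st.2) := by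
  induction rows generalizing st with
  | nil => simp [List.foldl]; exact Prod.ext h rfl
  | cons r rs ih =>
      simp only [List.foldl]
      exact ih _ (pv_add_inv _ _ _ h)

-- A's outer loop: same invariant over the whole table
lemma pv_outer (table : List (List (List (List String)))) (st : PySem.Set String × PySem.Set String)
    (h : st.1 = PySem.Set.ofList (st.2.map pvPrefix)) :
    table.foldl
      (fun st t =>
        (PySem.List.pyGetD t 0 []).foldl
          (fun st r =>
            (PySem.Set.add st.1 (pvPrefix (PySem.List.pyGetD r 0 "")),
             PySem.Set.add st.2 (PySem.List.pyGetD r 0 ""))) st) st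
    = (PySem.Set.ofList
        ((table.foldl
            (fun s t =>
              (PySem.List.pyGetD t 0 []).foldl
                (fun s r => PySem.Set.add s (PySem.List.pyGetD r 0 "")) s) st.2).map pvPrefix),
       table.foldl
         (fun s t =>
           (PySem.List.pyGetD t 0 []).foldl
             (fun s r => PySem.Set.add s (PySem.List.pyGetD r 0 "")) s) st.2) := by
  induction table generalizing st with
  | nil => simp [List.foldl]; exact Prod.ext h rfl
  | cons t ts ih =>
      simp only [List.foldl]
      rw [pv_inner _ _ h]
      exact ih _ (by simp)

-- A's nested full-name fold is Set.update by the flattened full-name list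
lemma pv_foldF (table : List (List (List (List String)))) (s : PySem.Set String) :
    table.foldl
      (fun s t =>
        (PySem.List.pyGetD t 0 []).foldl
          (fun s r => PySem.Set.add s (PySem.List.pyGetD r 0 "")) s) s
    = PySem.Set.update s (pvFulls table) := by
  induction table generalizing s with
  | nil => simp [pvFulls, PySem.Set.update]
  | cons t ts ih =>
      simp only [List.foldl]
      rw [← PySem.Set.update_map_eq_foldl_add, ih]
      simp [pvFulls, PySem.Set.update_append, pvRowvals]

-- one add step commutes with dedup-after-map
lemma pv_map_add (s : List String) (x : String) :
    PySem.Set.ofList ((PySem.Set.add s x).map pvPrefix)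
    = PySem.Set.add (PySem.Set.ofList (s.map pvPrefix)) (pvPrefix x) := by
  by_cases hx : x ∈ s
  · rw [PySem.Set.add_of_mem hx,
      PySem.Set.add_of_mem (by rw [PySem.Set.mem_ofList]; exact List.mem_map_of_mem hx)]
  · rw [PySem.Set.add_of_not_mem hx, List.map_append, List.map_singleton,
      PySem.Set.ofList_append_singleton]

lemma pv_map_foldl (L : List String) (s : List String) :
    PySem.Set.ofList ((L.foldl PySem.Set.add s).map pvPrefix)
    = PySem.Set.update (PySem.Set.ofList (s.map pvPrefix)) (L.map pvPrefix) := by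
  induction L generalizing s with
  | nil => simp [PySem.Set.update]
  | cons x L ih =>
      simp only [List.foldl, List.map_cons]
      rw [ih, pv_map_add, PySem.Set.update_cons]

-- splitting the deduplicated list gives the same prefix set as splitting everything
lemma pv_map_ofList (L : List String) :
    PySem.Set.ofList ((PySem.Set.ofList L).map pvPrefix)
    = PySem.Set.ofList (L.map pvPrefix) := by
  rw [PySem.Set.ofList_eq_foldl L, pv_map_foldl]
  simp [PySem.Set.update_nil_left]

-- updating by a deduplicated list is updating by the list itself
lemma pv_update_ofList (s : PySem.Set String) (l : List String) :
    PySem.Set.update s (PySem.Set.ofList l) = PySem.Set.update s l := by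
  rw [PySem.Set.update_eq_append_filter, PySem.Set.update_eq_append_filter,
    PySem.Set.ofList_ofList]

-- union of two deduplicated lists = dedup of the concatenation
lemma pv_union_ofList (a b : List String) :
    PySem.Set.union (PySem.Set.ofList a) (PySem.Set.ofList b)
    = PySem.Set.ofList (a ++ b) := by
  rw [PySem.Set.ofList_append, PySem.Set.union, pv_update_ofList]

-- B's divide-and-conquer recursion computes the canonical pair of sets
lemma pv_alt_canon (table : List (List (List (List String)))) :
    table_summary_alt table
    = (PySem.Set.ofList ((pvFulls table).map pvPrefix), PySem.Set.ofList (pvFulls table)) := by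
  induction table using table_summary_alt.induct with
  | case1 =>
      simp [table_summary_alt, pvFulls, PySem.Set.empty]
  | case2 table h0 h1 =>
      obtain ⟨t, ht⟩ : ∃ t, table = [t] := by
        cases table with
        | nil => exact absurd rfl h0
        | cons t ts =>
            cases ts with
            | nil => exact ⟨t, rfl⟩
            | cons u us => simp at h1
      subst ht
      rw [table_summary_alt]
      simp only [if_neg h0, if_pos h1]
      have hget : PySem.List.pyGetD [t] 0 ([] : List (List (List String))) = t := by
        simp [PySem.List.pyGetD, PySem.List.pyIdx?, PySem.List.pyGet?]
      rw [hget]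
      simp only [pvFulls, List.flatMap_cons, List.flatMap_nil, List.append_nil, pvRowvals]
      rw [pv_map_ofList]
  | case3 table h0 h1 mid ihl ihr =>
      rw [table_summary_alt]
      simp only [if_neg h0, if_neg h1]
      have hmid : mid = ((table.length / 2 : Nat) : Int) := by
        show PySem.Int.floordiv ((table.length : Int)) 2 = ((table.length / 2 : Nat) : Int)
        exact_mod_cast PySem.Int.floordiv_natCast table.length 2
      have hsplit : pvFulls table
          = pvFulls (table.take (table.length / 2)) ++ pvFulls (table.drop (table.length / 2)) := by
        simp only [pvFulls]
        rw [← List.flatMap_append, List.take_append_drop]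
      have hmid' : PySem.Int.floordiv ((table.length : Int)) 2
          = ((table.length / 2 : Nat) : Int) := hmid
      rw [hmid, PySem.List.slice_to_natCast] at ihl
      rw [hmid, PySem.List.slice_from_natCast] at ihr
      rw [hmid', PySem.List.slice_to_natCast, PySem.List.slice_from_natCast, ihl, ihr]
      rw [pv_union_ofList, pv_union_ofList, hsplit, List.map_append]

-- ===== VERDICT (by name: the statement is the Claim_ definition above) =====
theorem table_summary_spec : Claim_equal_table_summary := by
  intro table _ _
  unfold Spec_table_summary table_summary
  rw [pv_alt_canon, pv_outer table (PySem.Set.empty, PySem.Set.empty) rfl]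
  rw [pv_foldF]
  rw [show PySem.Set.update (PySem.Set.empty) (pvFulls table) = PySem.Set.ofList (pvFulls table)
        from PySem.Set.update_nil_left _]
  rw [pv_map_ofList]
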